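-- pv_equiv track=rewrite | github.com/T4g1/3eme | Traitement d'image/src/common.py | convolutionXY
-- ===== SOURCE A (Python) =====
-- def convolutionXY(data, w, h, m1, m2, coef):
--     src = data
--     dst = [0] * w * h
--
--     for i in range(1, h - 1):
--         for j in range(1, w - 1):
--             cpt = 0
--             gx = 0
--             gy = 0
--
--             for x in range(-1, 2):
--                 for y in range(-1, 2):
--                     gx = gx + m1[cpt] * src[(i + x) * w + j + y]
--                     gy = gy + m2[cpt] * src[(i + x) * w + j + y]
--
--                     cpt += 1
--
--             pt = abs(gx) + abs(gy)
--             if pt < 0: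
--                 pt = 0
--             elif pt > 255:
--                 pt = 255
--
--             dst[(i * w) + j] = int(pt);
--
--     return dst
-- ===== SOURCE B (Python) =====
-- def convolutionXY(data, w, h, m1, m2, coef):
--     def conv3(m):
--         # full-size single-kernel convolution: zeros on the border, 3x3 dot product inside
--         out = []
--         for i in range(h):
--             for j in range(w):
--                 if 1 <= i <= h - 2 and 1 <= j <= w - 2:
--                     s = 0
--                     for x in (-1, 0, 1):
--                         for y in (-1, 0, 1):
--                             s += m[3 * (x + 1) + (y + 1)] * data[(i + x) * w + j + y]
--                     out.append(s)
--                 else: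
--                     out.append(0)
--         return out
--
--     gx_arr = conv3(m1)
--     gy_arr = conv3(m2)
--     return [min(abs(a) + abs(b), 255) for a, b in zip(gx_arr, gy_arr)]
-- ===== Notes on version B (the rewrite author's own statement) =====
-- stated objective: alternative
-- what changed: A computes gx and gy together in one fused interior loop with a running kernel counter and writes into a preallocated [0]*w*h buffer; B convolves the image twice with a single-kernel conv3 helper (building each full-size gradient array by appending, border pixels written as zeros) and then merges them in a separate pass computing min(|gx|+|gy|, 255) over the zipped arrays.
import Mathlib
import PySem

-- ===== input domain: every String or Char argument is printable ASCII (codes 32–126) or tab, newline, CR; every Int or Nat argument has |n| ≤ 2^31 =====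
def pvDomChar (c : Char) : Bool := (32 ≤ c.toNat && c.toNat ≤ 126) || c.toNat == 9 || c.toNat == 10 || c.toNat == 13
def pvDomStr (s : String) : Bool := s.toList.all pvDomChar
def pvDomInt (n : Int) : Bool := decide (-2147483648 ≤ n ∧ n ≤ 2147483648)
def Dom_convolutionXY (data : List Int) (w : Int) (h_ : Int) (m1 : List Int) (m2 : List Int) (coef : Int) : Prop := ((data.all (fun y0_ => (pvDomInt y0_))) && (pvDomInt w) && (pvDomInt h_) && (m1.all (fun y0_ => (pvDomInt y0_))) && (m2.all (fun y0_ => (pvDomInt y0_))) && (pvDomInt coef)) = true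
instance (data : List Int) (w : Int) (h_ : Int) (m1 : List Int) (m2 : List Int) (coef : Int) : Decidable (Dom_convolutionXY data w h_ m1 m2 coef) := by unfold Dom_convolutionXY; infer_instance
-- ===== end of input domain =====

-- B replaces A's fused interior gx/gy loop by two independent single-kernel convolution
-- passes plus a separate magnitude/clamp merge pass (objective: alternative decomposition).


-- ===== PORT A =====
-- literal transliteration of A: dst = [0]*w*h, then for each interior pixel a fused
-- 3x3 loop accumulating (cpt, gx, gy), the clamp chain, and dst[(i*w)+j] = int(pt)
-- (int() is the identity on ints). pyGetD/pySetD are exact here: under Pre_ every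
-- index taken is in range (and nonnegative), where Python indexing raises Pre_ excludes.
def convolutionXY (data : List Int) (w : Int) (h_ : Int) (m1 : List Int) (m2 : List Int) (coef : Int) : List Int :=
  let src := data
  let dst : List Int := List.replicate (w.toNat * h_.toNat) 0
  (PySem.List.pyRange 1 (h_ - 1) 1).foldl (fun dst i =>
    (PySem.List.pyRange 1 (w - 1) 1).foldl (fun dst j =>
      let st := (PySem.List.pyRange (-1) 2 1).foldl (fun st x =>
        (PySem.List.pyRange (-1) 2 1).foldl (fun (st : Int × Int × Int) y =>
          (st.1 + 1,
           st.2.1 + PySem.List.pyGetD m1 st.1 0 * PySem.List.pyGetD src ((i + x) * w + j + y) 0,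
           st.2.2 + PySem.List.pyGetD m2 st.1 0 * PySem.List.pyGetD src ((i + x) * w + j + y) 0)) st)
        ((0, 0, 0) : Int × Int × Int)
      let pt := |st.2.1| + |st.2.2|
      let pt := if pt < 0 then (0 : Int) else if pt > 255 then 255 else pt
      PySem.List.pySetD dst (i * w + j) pt) dst) dst

-- ===== PORT B =====
-- B's 3x3 dot product at pixel (i, j) for a single kernel m (conv3's inner sum)
def pvDot (data : List Int) (w : Int) (m : List Int) (i j : Int) : Int :=
  [(-1 : Int), 0, 1].foldl (fun s x =>
    [(-1 : Int), 0, 1].foldl (fun s y =>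
      s + PySem.List.pyGetD m (3 * (x + 1) + (y + 1)) 0
            * PySem.List.pyGetD data ((i + x) * w + j + y) 0) s) 0

-- B's conv3: full-size single-kernel convolution, zeros on the border
def pvConv3 (data : List Int) (w : Int) (h_ : Int) (m : List Int) : List Int :=
  (PySem.List.pyRange 0 h_ 1).foldl (fun out i =>
    (PySem.List.pyRange 0 w 1).foldl (fun out j =>
      if 1 ≤ i ∧ i ≤ h_ - 2 ∧ 1 ≤ j ∧ j ≤ w - 2 then out ++ [pvDot data w m i j]
      else out ++ [0]) out) []

def convolutionXY_alt (data : List Int) (w : Int) (h_ : Int) (m1 : List Int) (m2 : List Int) (coef : Int) : List Int :=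
  let gxArr := pvConv3 data w h_ m1
  let gyArr := pvConv3 data w h_ m2
  (gxArr.zip gyArr).map (fun ab => min (|ab.1| + |ab.2|) 255)

-- ===== PRECONDITION & SPEC =====
-- Pre_ excludes exactly the inputs where Python A raises IndexError: when there is at
-- least one interior pixel (w ≥ 3 and h ≥ 3), A reads m1[0..8], m2[0..8] and
-- data[0..w*h-1], so those lists must be long enough; otherwise A returns [0]*w*h
-- without touching them.
def Pre_convolutionXY (data : List Int) (w : Int) (h_ : Int) (m1 : List Int) (m2 : List Int) (coef : Int) : Prop :=
  (3 ≤ w ∧ 3 ≤ h_) → (9 ≤ m1.length ∧ 9 ≤ m2.length ∧ w * h_ ≤ (data.length : Int))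
instance (data : List Int) (w : Int) (h_ : Int) (m1 : List Int) (m2 : List Int) (coef : Int) : Decidable (Pre_convolutionXY data w h_ m1 m2 coef) := by unfold Pre_convolutionXY; infer_instance
def pvWitness_convolutionXY : List Int × Int × Int × List Int × List Int × Int :=
  ([1, 2, 3, 4, 5, 6, 7, 8, 9], 3, 3, [1, 0, -1, 2, 0, -2, 1, 0, -1], [1, 2, 1, 0, 0, 0, -1, -2, -1], 1)

def Spec_convolutionXY (data : List Int) (w : Int) (h_ : Int) (m1 : List Int) (m2 : List Int) (coef : Int) (out : List Int) : Prop := out = convolutionXY_alt data w h_ m1 m2 coef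
instance (data : List Int) (w : Int) (h_ : Int) (m1 : List Int) (m2 : List Int) (coef : Int) (out : List Int) : Decidable (Spec_convolutionXY data w h_ m1 m2 coef out) := by unfold Spec_convolutionXY; infer_instance

-- ===== CLAIM (what is proved, stated in full; the proofs are below) =====
def Claim_equal_convolutionXY : Prop := ∀ (data : List Int) (w : Int) (h_ : Int) (m1 : List Int) (m2 : List Int) (coef : Int), Dom_convolutionXY data w h_ m1 m2 coef → Pre_convolutionXY data w h_ m1 m2 coef → Spec_convolutionXY data w h_ m1 m2 coef (convolutionXY data w h_ m1 m2 coef)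

-- ===== LEMMAS AND PROOFS =====

-- the merged per-pixel value of B at an interior pixel
def pvPix (data : List Int) (w : Int) (m1 m2 : List Int) (i j : Int) : Int :=
  min (|pvDot data w m1 i j| + |pvDot data w m2 i j|) 255

theorem pvPix_def (data : List Int) (w : Int) (m1 m2 : List Int) (i j : Int) :
    pvPix data w m1 m2 i j = min (|pvDot data w m1 i j| + |pvDot data w m2 i j|) 255 := rfl

-- B's row i, as a map over the column range
def pvBrow (data : List Int) (w : Int) (h_ : Int) (m1 m2 : List Int) (i : Int) : List Int :=
  (PySem.List.pyRange 0 w 1).map (fun j =>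
    if 1 ≤ i ∧ i ≤ h_ - 2 ∧ 1 ≤ j ∧ j ≤ w - 2 then pvPix data w m1 m2 i j else 0)

-- row i as A writes it: zero borders around the interior values
def pvRowVals (data : List Int) (w : Int) (m1 m2 : List Int) (i : Int) : List Int :=
  (0 : Int) :: ((PySem.List.pyRange 1 (w - 1) 1).map (pvPix data w m1 m2 i) ++ [0])

theorem pyR3 : PySem.List.pyRange (-1) 2 1 = [-1, 0, 1] := by decide

-- A's fused 3x3 fold computes (9, dot m1, dot m2)
theorem pvInnerFold_eq (data m1 m2 : List Int) (w i j : Int) :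
    (PySem.List.pyRange (-1) 2 1).foldl (fun st x =>
        (PySem.List.pyRange (-1) 2 1).foldl (fun (st : Int × Int × Int) y =>
          (st.1 + 1,
           st.2.1 + PySem.List.pyGetD m1 st.1 0 * PySem.List.pyGetD data ((i + x) * w + j + y) 0,
           st.2.2 + PySem.List.pyGetD m2 st.1 0 * PySem.List.pyGetD data ((i + x) * w + j + y) 0)) st)
        ((0, 0, 0) : Int × Int × Int)
      = (9, pvDot data w m1 i j, pvDot data w m2 i j) := by
  simp only [pyR3, pvDot, List.foldl]
  norm_num

-- A's clamp chain is min · 255 (the pt < 0 branch is dead: pt is a sum of absolute values)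
theorem pvClamp_eq (a b : Int) :
    (if |a| + |b| < 0 then (0 : Int) else if |a| + |b| > 255 then 255 else |a| + |b|)
      = min (|a| + |b|) 255 := by
  have ha := abs_nonneg a; have hb := abs_nonneg b; omega

-- generic left-to-right set fold filling a zero window
theorem pvSetFold (v : Int → Int) (c : Int) :
    ∀ (n : Nat) (b : Int) (pre suf : List Int), 0 ≤ b → (pre.length : Int) = c + b →
    (PySem.List.pyRange b (b + n) 1).foldl (fun L j => PySem.List.pySetD L (c + j) (v j))
        (pre ++ List.replicate n 0 ++ suf)
      = pre ++ (PySem.List.pyRange b (b + n) 1).map v ++ suf := by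
  intro n
  induction n with
  | zero => intro b pre suf hb hpre; simp [PySem.List.pyRange_one_eq_nil]
  | succ n ih =>
    intro b pre suf hb hpre
    rw [show (b : Int) + ((n + 1 : Nat) : Int) = (b + 1) + (n : Nat) by push_cast; ring]
    rw [PySem.List.pyRange_one_cons (show b < b + 1 + (n : Int) by omega)]
    simp only [List.foldl_cons, List.map_cons]
    have hset : PySem.List.pySetD (pre ++ List.replicate (n + 1) (0 : Int) ++ suf) (c + b) (v b)
        = (pre ++ [v b]) ++ List.replicate n (0 : Int) ++ suf := by
      rw [PySem.List.pySetD_of_nonneg _ _ (show (0 : Int) ≤ c + b by omega)]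
      rw [show (c + b).toNat = pre.length by omega]
      rw [List.replicate_succ]
      simp
    rw [hset, ih (b + 1) (pre ++ [v b]) suf (by omega) (by simp; omega)]
    simp

-- A's interior row fold writes the interior values into a zeroed row
theorem pvRowFold (v : Int → Int) (w i : Int) (hw : 3 ≤ w) (hi : 1 ≤ i)
    (pre suf : List Int) (hpre : (pre.length : Int) = i * w) :
    (PySem.List.pyRange 1 (w - 1) 1).foldl (fun L j => PySem.List.pySetD L (i * w + j) (v j))
        (pre ++ List.replicate w.toNat 0 ++ suf)
      = pre ++ ((0 : Int) :: ((PySem.List.pyRange 1 (w - 1) 1).map v ++ [0])) ++ suf := by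
  have hn : (w : Int) - 1 = 1 + ((w.toNat - 2 : Nat) : Int) := by omega
  have hrep : ∀ k : Nat, List.replicate (k + 1 + 1) (0 : Int) = 0 :: (List.replicate k 0 ++ [0]) := by
    intro k
    rw [List.replicate_succ' (n := k + 1), List.replicate_succ, List.cons_append]
  have hsplit : List.replicate w.toNat (0 : Int) = 0 :: (List.replicate (w.toNat - 2) 0 ++ [0]) := by
    conv_lhs => rw [show w.toNat = (w.toNat - 2) + 1 + 1 by omega]
    exact hrep _
  rw [hn, hsplit]
  have hmain := pvSetFold v (i * w) (w.toNat - 2) 1 (pre ++ [0]) (0 :: suf) (by omega)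
      (by simp only [List.length_append, List.length_cons, List.length_nil]; push_cast; omega)
  have hL : pre ++ ((0 : Int) :: (List.replicate (w.toNat - 2) 0 ++ [0])) ++ suf
      = (pre ++ [0]) ++ List.replicate (w.toNat - 2) (0 : Int) ++ (0 :: suf) := by simp
  rw [hL, hmain]
  simp

-- A's outer fold, one zeroed row block at a time
theorem pvOuterFold (data m1 m2 : List Int) (w : Int) (hw : 3 ≤ w) :
    ∀ (n : Nat) (b : Int) (pre suf : List Int), 1 ≤ b → (pre.length : Int) = b * w →
    (PySem.List.pyRange b (b + n) 1).foldl (fun dst i =>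
        (PySem.List.pyRange 1 (w - 1) 1).foldl (fun L j =>
          PySem.List.pySetD L (i * w + j) (pvPix data w m1 m2 i j)) dst)
        (pre ++ List.replicate (n * w.toNat) 0 ++ suf)
      = pre ++ (PySem.List.pyRange b (b + n) 1).flatMap (pvRowVals data w m1 m2) ++ suf := by
  intro n
  induction n with
  | zero => intro b pre suf hb hpre; simp [PySem.List.pyRange_one_eq_nil]
  | succ n ih =>
    intro b pre suf hb hpre
    rw [show (b : Int) + ((n + 1 : Nat) : Int) = (b + 1) + (n : Nat) by push_cast; ring]
    rw [PySem.List.pyRange_one_cons (show b < b + 1 + (n : Int) by omega)]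
    simp only [List.foldl_cons, List.flatMap_cons]
    have hsplit : pre ++ List.replicate ((n + 1) * w.toNat) (0 : Int) ++ suf
        = pre ++ List.replicate w.toNat (0 : Int) ++ (List.replicate (n * w.toNat) 0 ++ suf) := by
      rw [show (n + 1) * w.toNat = w.toNat + n * w.toNat by ring]
      simp only [List.replicate_add, List.append_assoc]
    rw [hsplit, pvRowFold (pvPix data w m1 m2 b) w b hw hb pre _ hpre]
    have hlen : ((pre ++ pvRowVals data w m1 m2 b).length : Int) = (b + 1) * w := by
      simp [pvRowVals, PySem.List.length_pyRange_one]
      have hbw : (b + 1) * w = b * w + w := by ring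
      omega
    have hih := ih (b + 1) (pre ++ pvRowVals data w m1 m2 b) suf (by omega) hlen
    rw [show pre ++ ((0 : Int) :: ((PySem.List.pyRange 1 (w - 1) 1).map (pvPix data w m1 m2 b) ++ [0]))
          ++ (List.replicate (n * w.toNat) 0 ++ suf)
        = (pre ++ pvRowVals data w m1 m2 b) ++ List.replicate (n * w.toNat) (0 : Int) ++ suf by
      simp [pvRowVals]]
    rw [hih]
    simp [pvRowVals]

-- B's program, flattened into rows
theorem pvConv3_eq (data : List Int) (w h_ : Int) (m : List Int) :
    pvConv3 data w h_ m = (PySem.List.pyRange 0 h_ 1).flatMap (fun i =>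
      (PySem.List.pyRange 0 w 1).map (fun j =>
        if 1 ≤ i ∧ i ≤ h_ - 2 ∧ 1 ≤ j ∧ j ≤ w - 2 then pvDot data w m i j else 0)) := by
  unfold pvConv3
  have hbody : ∀ (i : Int) (out : List Int) (j : Int),
      (if 1 ≤ i ∧ i ≤ h_ - 2 ∧ 1 ≤ j ∧ j ≤ w - 2 then out ++ [pvDot data w m i j] else out ++ [0])
        = out ++ [if 1 ≤ i ∧ i ≤ h_ - 2 ∧ 1 ≤ j ∧ j ≤ w - 2 then pvDot data w m i j else 0] := by
    intro i out j; split <;> rfl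
  simp only [hbody, PySem.List.foldl_append_singleton_eq_map]
  rw [List.flatMap_eq_foldl]

-- zip distributes over flatMaps with row-wise equal lengths
theorem pvZipFlat {α : Type} (f g : α → List Int) :
    ∀ (l : List α), (∀ x ∈ l, (f x).length = (g x).length) →
    (l.flatMap f).zip (l.flatMap g) = l.flatMap (fun x => (f x).zip (g x)) := by
  intro l
  induction l with
  | nil => intro _; simp
  | cons a t ih =>
    intro h
    simp only [List.flatMap_cons]
    rw [List.zip_append (h a (by simp)), ih (fun x hx => h x (by simp [hx]))]

theorem pvB_eq (data : List Int) (w h_ : Int) (m1 m2 : List Int) (coef : Int) :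
    convolutionXY_alt data w h_ m1 m2 coef
      = (PySem.List.pyRange 0 h_ 1).flatMap (pvBrow data w h_ m1 m2) := by
  simp only [convolutionXY_alt]
  rw [pvConv3_eq, pvConv3_eq,
      pvZipFlat _ _ _ (fun x hx => by simp), List.map_flatMap]
  apply List.flatMap_congr
  intro i hi
  rw [List.zip_map', List.map_map]
  unfold pvBrow
  apply List.map_congr_left
  intro j hj
  simp only [Function.comp_apply]
  split <;> simp [pvPix]

-- a run of identical zero rows is a replicate
theorem pvFlatRep (k : Nat) : ∀ (n : Nat),
    (List.range n).flatMap (fun _ => List.replicate k (0 : Int)) = List.replicate (n * k) 0 := by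
  intro n
  induction n with
  | zero => simp
  | succ n ih =>
    rw [List.range_succ]
    simp only [List.flatMap_append, List.flatMap_cons, List.flatMap_nil, List.append_nil, ih]
    rw [Nat.succ_mul, List.replicate_add]

-- border rows of B are all zeros
theorem pvBrow_border (data : List Int) (w h_ : Int) (m1 m2 : List Int) (i : Int)
    (h : ¬ (1 ≤ i ∧ i ≤ h_ - 2)) :
    pvBrow data w h_ m1 m2 i = List.replicate w.toNat 0 := by
  unfold pvBrow
  rw [List.map_congr_left (fun j (hj : j ∈ PySem.List.pyRange 0 w 1) =>
    if_neg (fun hc => h ⟨hc.1, hc.2.1⟩))]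
  rw [List.map_const', PySem.List.length_pyRange_one]
  simp

-- with fewer than 3 columns every row of B is all zeros
theorem pvBrow_wsmall (data : List Int) (w h_ : Int) (m1 m2 : List Int) (i : Int)
    (hw : w < 3) :
    pvBrow data w h_ m1 m2 i = List.replicate w.toNat 0 := by
  unfold pvBrow
  rw [List.map_congr_left (fun j (hj : j ∈ PySem.List.pyRange 0 w 1) =>
    if_neg (fun hc => by
      have := (PySem.List.mem_pyRange_one.mp hj).2
      omega))]
  rw [List.map_const', PySem.List.length_pyRange_one]
  simp

-- interior rows of B are A's row values
theorem pvBrow_interior (data : List Int) (w h_ : Int) (m1 m2 : List Int) (i : Int)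
    (hw : 3 ≤ w) (hi1 : 1 ≤ i) (hi2 : i ≤ h_ - 2) :
    pvBrow data w h_ m1 m2 i = pvRowVals data w m1 m2 i := by
  unfold pvBrow pvRowVals
  have h1 : PySem.List.pyRange 0 w 1 = 0 :: PySem.List.pyRange 1 w 1 := by
    rw [PySem.List.pyRange_one_cons (show (0:Int) < w by omega)]
    norm_num
  have h3 : PySem.List.pyRange (w - 1) w 1 = [w - 1] := by
    rw [PySem.List.pyRange_one_cons (show w - 1 < w by omega),
        PySem.List.pyRange_one_eq_nil (by omega)]
  rw [h1, PySem.List.pyRange_one_append 1 (w - 1) w (by omega) (by omega), h3]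
  simp only [List.map_cons, List.map_append]
  rw [if_neg (by omega)]
  congr 1
  congr 1
  · apply List.map_congr_left
    intro j hj
    have := PySem.List.mem_pyRange_one.mp hj
    rw [if_pos ⟨hi1, hi2, this.1, by omega⟩]
  · simp only [List.map_nil]
    rw [if_neg (by omega)]

-- h zero rows flattened are one big zero block
theorem pvZeroRows (h_ : Int) (k : Nat) :
    (PySem.List.pyRange 0 h_ 1).flatMap (fun _ => List.replicate k (0 : Int))
      = List.replicate (h_.toNat * k) 0 := by
  rw [PySem.List.pyRange_one, List.flatMap_map]
  simp only [Int.sub_zero]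
  exact pvFlatRep k h_.toNat

-- ===== VERDICT (by name: the statement is the Claim_ definition above) =====
theorem convolutionXY_spec : Claim_equal_convolutionXY := by
  intro data w h_ m1 m2 coef hdom hpre
  unfold Spec_convolutionXY
  rw [pvB_eq]
  simp only [convolutionXY]
  simp only [pvInnerFold_eq]
  simp only [pvClamp_eq]
  simp only [← pvPix_def]
  by_cases h3 : 3 ≤ w ∧ 3 ≤ h_
  · obtain ⟨hw, hh⟩ := h3
    -- split B's rows: first, interior, last
    have hlast : PySem.List.pyRange (h_ - 1) h_ 1 = [h_ - 1] := by
      rw [PySem.List.pyRange_one_cons (show h_ - 1 < h_ by omega),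
          PySem.List.pyRange_one_eq_nil (a := h_ - 1 + 1) (b := h_) (by omega)]
    have hsplitB : PySem.List.pyRange 0 h_ 1
        = 0 :: (PySem.List.pyRange 1 (h_ - 1) 1 ++ [h_ - 1]) := by
      rw [PySem.List.pyRange_one_cons (show (0:Int) < h_ by omega)]
      norm_num
      rw [PySem.List.pyRange_one_append 1 (h_ - 1) h_ (by omega) (by omega), hlast]
    rw [hsplitB]
    simp only [List.flatMap_cons, List.flatMap_append, List.flatMap_nil, List.append_nil]
    rw [pvBrow_border data w h_ m1 m2 0 (by omega),
        pvBrow_border data w h_ m1 m2 (h_ - 1) (by omega)]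
    rw [List.flatMap_congr (fun i hi => pvBrow_interior data w h_ m1 m2 i hw
      (PySem.List.mem_pyRange_one.mp hi).1 (by have := (PySem.List.mem_pyRange_one.mp hi).2; omega))]
    -- A side: split the zero buffer into first row / interior block / last row
    have hmul : w.toNat * h_.toNat = w.toNat + ((h_.toNat - 2) * w.toNat + w.toNat) := by
      have hh2 : h_.toNat = (h_.toNat - 2) + 2 := by omega
      calc w.toNat * h_.toNat = w.toNat * ((h_.toNat - 2) + 2) := by rw [← hh2]
        _ = w.toNat + ((h_.toNat - 2) * w.toNat + w.toNat) := by ring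
    have hbuf : List.replicate (w.toNat * h_.toNat) (0 : Int)
        = List.replicate w.toNat 0 ++ List.replicate ((h_.toNat - 2) * w.toNat) 0
            ++ List.replicate w.toNat 0 := by
      rw [hmul, List.replicate_add, List.replicate_add, List.append_assoc]
    have hrange : (h_ : Int) - 1 = 1 + ((h_.toNat - 2 : Nat) : Int) := by omega
    rw [hbuf, hrange]
    rw [pvOuterFold data m1 m2 w hw (h_.toNat - 2) 1
      (List.replicate w.toNat 0) (List.replicate w.toNat 0) le_rfl
      (by simp; omega)]
    simp
  · -- no interior pixels: both sides are the all-zero image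
    have hzero : ∀ i : Int, i ∈ PySem.List.pyRange 0 h_ 1 →
        pvBrow data w h_ m1 m2 i = List.replicate w.toNat 0 := by
      intro i hi
      rcases lt_or_ge w 3 with hw | hw
      · exact pvBrow_wsmall data w h_ m1 m2 i hw
      · exact pvBrow_border data w h_ m1 m2 i (by omega)
    rw [List.flatMap_congr hzero, pvZeroRows h_ w.toNat]
    rcases lt_or_ge h_ 3 with hh | hh
    · rw [PySem.List.pyRange_one_eq_nil (show h_ - 1 ≤ 1 by omega)]
      simp [Nat.mul_comm]
    · have hw : w < 3 := by omega
      rw [PySem.List.pyRange_one_eq_nil (show w - 1 ≤ 1 by omega)]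
      simp only [List.foldl_nil, List.foldl_fixed]
      rw [Nat.mul_comm]
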